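-- pv_equiv track=rewrite | github.com/M4przybysz/liczby-czworacze | main.py | quadruplet
-- ===== SOURCE A (Python) =====
-- def isPrimary(x):
--     if x < 2: return False
--     if x >= 2:
--         for i in range(2, x//2):
--             if x % i == 0: return False
--     return True
--
-- def quadruplet(x):
--     T = []
--     y = 2
--     while y + 8 <= x:
--         if isPrimary(y)==True and isPrimary(y + 2)==True and isPrimary(y + 6)==True and isPrimary(y + 8)==True:
--             T.append([y, y + 2, y + 6, y + 8])
--         y += 1
--     return T
-- ===== SOURCE B (Python) =====
-- def isprime(n):
--     if n < 2:
--         return False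
--     i = 2
--     while i * i <= n:
--         if n % i == 0:
--             return False
--         i += 1
--     return True
--
-- def quadruplet(x):
--     # any prime quadruplet start y > 4 satisfies y % 6 == 5; scan only that residue class
--     T = []
--     y = 5
--     while y + 8 <= x:
--         if isprime(y) and isprime(y + 2) and isprime(y + 6) and isprime(y + 8):
--             T.append([y, y + 2, y + 6, y + 8])
--         y += 6
--     return T
-- ===== Notes on version B (the rewrite author's own statement) =====
-- stated objective: faster
-- what changed: B scans only starts y ≡ 5 (mod 6) (every other window provably contains a multiple of 2 or 3) and trial-divides only up to √n instead of n/2, replacing A's full scan with √n tests on one residue class.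
import Mathlib
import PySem

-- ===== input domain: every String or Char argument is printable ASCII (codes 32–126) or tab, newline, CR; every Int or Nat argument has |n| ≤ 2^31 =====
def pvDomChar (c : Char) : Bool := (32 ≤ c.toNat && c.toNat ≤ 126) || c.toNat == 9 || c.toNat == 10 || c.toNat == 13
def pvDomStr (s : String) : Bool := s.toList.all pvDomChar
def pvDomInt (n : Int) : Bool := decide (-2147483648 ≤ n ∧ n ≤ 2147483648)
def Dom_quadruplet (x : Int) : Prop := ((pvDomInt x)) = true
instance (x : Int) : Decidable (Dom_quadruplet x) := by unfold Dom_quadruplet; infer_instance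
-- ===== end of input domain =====

-- B scans only the residue class y ≡ 5 (mod 6) and trial-divides up to √n instead of n/2: same output, asymptotically faster.

-- ===== PORT A =====
def isPrimary (x : Int) : Bool :=
  if x < 2 then false
  else if 2 ≤ x then
    if (PySem.List.pyRange 2 (PySem.Int.floordiv x 2) 1).any (fun i => PySem.Int.mod x i == 0)
    then false
    else true
  else true

def quadLoopA (x y : Int) (T : List (List Int)) : List (List Int) :=
  if y + 8 ≤ x then
    quadLoopA x (y + 1)
      (if isPrimary y == true && isPrimary (y + 2) == true && isPrimary (y + 6) == true && isPrimary (y + 8) == true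
       then T ++ [[y, y + 2, y + 6, y + 8]]
       else T)
  else T
termination_by (x - y).toNat
decreasing_by omega

def quadruplet (x : Int) : List (List Int) := quadLoopA x 2 []

-- ===== PORT B =====
def isprimeLoop (n i : Int) : Bool :=
  if i * i ≤ n then
    if PySem.Int.mod n i == 0 then false
    else isprimeLoop n (i + 1)
  else true
termination_by (n + 1 - i).toNat
decreasing_by
  have h1 : i ≤ i * i := by nlinarith [mul_self_nonneg i]
  omega

def isprime (n : Int) : Bool :=
  if n < 2 then false else isprimeLoop n 2

def quadLoopB (x y : Int) (T : List (List Int)) : List (List Int) :=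
  if y + 8 ≤ x then
    quadLoopB x (y + 6)
      (if isprime y && isprime (y + 2) && isprime (y + 6) && isprime (y + 8)
       then T ++ [[y, y + 2, y + 6, y + 8]]
       else T)
  else T
termination_by (x - y).toNat
decreasing_by omega

def quadruplet_alt (x : Int) : List (List Int) := quadLoopB x 5 []

-- ===== PRECONDITION & SPEC =====
def Spec_quadruplet (x : Int) (out : List (List Int)) : Prop := out = quadruplet_alt x
instance (x : Int) (out : List (List Int)) : Decidable (Spec_quadruplet x out) := by unfold Spec_quadruplet; infer_instance

-- ===== CLAIM (what is proved, stated in full; the proofs are below) =====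
def Claim_equal_quadruplet : Prop := ∀ (x : Int), Dom_quadruplet x → Spec_quadruplet x (quadruplet x)

-- ===== LEMMAS AND PROOFS =====

-- m ≥ 2 has no divisor in [2, m/2) iff it is prime or 4 (4 is the one composite whose range is empty)
lemma nat_no_div_iff (m : ℕ) (hm : 2 ≤ m) :
    (∀ k : ℕ, 2 ≤ k → k < m / 2 → ¬ k ∣ m) ↔ (m.Prime ∨ m = 4) := by
  constructor
  · intro h
    by_contra hc
    have hnp : ¬ m.Prime := fun hp => hc (Or.inl hp)
    have hne4 : m ≠ 4 := fun h4 => hc (Or.inr h4)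
    have hpd : m.minFac ∣ m := Nat.minFac_dvd m
    have hpp : (m.minFac).Prime := Nat.minFac_prime (by omega)
    have hp2 : 2 ≤ m.minFac := hpp.two_le
    have hsq : m.minFac * m.minFac ≤ m := by
      have := Nat.minFac_sq_le_self (by omega) hnp
      nlinarith [this]
    have key : 2 * m.minFac + 2 ≤ m := by
      rcases Nat.lt_or_ge m.minFac 3 with h3 | h3
      · have hp2' : m.minFac = 2 := by omega
        have hdvd2 : 2 ∣ m := hp2' ▸ hpd
        have hne2 : m ≠ 2 := fun h2 => hnp (h2 ▸ Nat.prime_two)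
        omega
      · have : 3 * m.minFac ≤ m.minFac * m.minFac := Nat.mul_le_mul_right _ h3
        omega
    exact h m.minFac hp2 (by omega) hpd
  · rintro (hp | rfl) k hk2 hklt hkd
    · rcases hp.eq_one_or_self_of_dvd k hkd with h | h
      · omega
      · have : m / 2 < m := Nat.div_lt_self (by omega) (by omega)
        omega
    · omega

-- A's trial division returns true iff x is prime or the quirk value 4
lemma isPrimary_iff (x : Int) : isPrimary x = true ↔ (2 ≤ x ∧ (Nat.Prime x.toNat ∨ x = 4)) := by
  unfold isPrimary
  by_cases hx : x < 2
  · rw [if_pos hx]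
    simp only [Bool.false_eq_true, false_iff]
    intro hcon
    omega
  · have hx2 : 2 ≤ x := by omega
    rw [if_neg hx, if_pos hx2, PySem.Int.floordiv_eq_ediv_of_pos (by norm_num)]
    obtain ⟨m, rfl⟩ : ∃ m : ℕ, x = (m : Int) := ⟨x.toNat, by omega⟩
    have hm : 2 ≤ m := by exact_mod_cast hx2
    have hdiv : ((m : Int)) / 2 = ((m / 2 : ℕ) : Int) :=
      Eq.symm (Nat.ToInt.div_congr rfl rfl)
    have hany : (PySem.List.pyRange 2 ((m : Int) / 2) 1).any (fun i => PySem.Int.mod (m : Int) i == 0) = true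
        ↔ ∃ k : ℕ, 2 ≤ k ∧ k < m / 2 ∧ k ∣ m := by
      simp only [List.any_eq_true, PySem.List.mem_pyRange_one, beq_iff_eq,
        PySem.Int.mod_eq_zero_iff_dvd]
      constructor
      · rintro ⟨i, ⟨h1, h2⟩, h3⟩
        refine ⟨i.toNat, by omega, ?_, ?_⟩
        · rw [hdiv] at h2; omega
        · have : i = ((i.toNat : ℕ) : Int) := by omega
          rw [this] at h3
          exact_mod_cast h3
      · rintro ⟨k, h1, h2, h3⟩
        exact ⟨(k : Int), ⟨by omega, by rw [hdiv]; omega⟩, by exact_mod_cast h3⟩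
    by_cases hA : (PySem.List.pyRange 2 ((m : Int) / 2) 1).any (fun i => PySem.Int.mod (m : Int) i == 0)
    · rw [if_pos hA]
      simp only [Bool.false_eq_true, false_iff]
      intro hcon
      obtain ⟨k, hk2, hklt, hkd⟩ := hany.mp hA
      have hmn : Nat.Prime m ∨ m = 4 := by
        rcases hcon.2 with h | h
        · left; simpa using h
        · right; exact_mod_cast h
      exact ((nat_no_div_iff m hm).mpr hmn) k hk2 hklt hkd
    · rw [if_neg hA]
      simp only [true_iff]
      refine ⟨hx2, ?_⟩
      have hno : ∀ k : ℕ, 2 ≤ k → k < m / 2 → ¬ k ∣ m := by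
        intro k hk2 hklt hkd
        exact hA (hany.mpr ⟨k, hk2, hklt, hkd⟩)
      rcases (nat_no_div_iff m hm).mp hno with h | h
      · left; simpa using h
      · right; exact_mod_cast h

-- B's loop returns true iff no divisor j with i ≤ j and j*j ≤ n exists
lemma isprimeLoop_iff (n i : Int) (hi : 2 ≤ i) :
    isprimeLoop n i = true ↔ ∀ j : Int, i ≤ j → j * j ≤ n → ¬ j ∣ n := by
  revert hi
  induction i using isprimeLoop.induct (n := n) with
  | case1 i h hmod =>
    intro hi
    rw [isprimeLoop, if_pos h, if_pos hmod]
    simp only [Bool.false_eq_true, false_iff]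
    intro hcon
    exact hcon i (le_refl i) h ((PySem.Int.mod_eq_zero_iff_dvd n i).mp (by simpa using hmod))
  | case2 i h hmod ih =>
    intro hi
    rw [isprimeLoop, if_pos h, if_neg hmod]
    have hnd : ¬ i ∣ n := by
      rw [← PySem.Int.mod_eq_zero_iff_dvd]
      simpa using hmod
    constructor
    · intro hl j hij hjj
      rcases eq_or_lt_of_le hij with rfl | hlt
      · exact hnd
      · exact ((ih (by omega)).mp hl) j (by omega) hjj
    · intro hall
      exact (ih (by omega)).mpr (fun j hij hjj => hall j (by omega) hjj)
  | case3 i h =>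
    intro hi
    rw [isprimeLoop, if_neg h]
    simp only [true_iff]
    intro j hij hjj hd
    have : i * i ≤ j * j := mul_le_mul hij hij (by omega) (by omega)
    omega

lemma isprime_iff (n : Int) : isprime n = true ↔ (2 ≤ n ∧ Nat.Prime n.toNat) := by
  unfold isprime
  by_cases hn : n < 2
  · rw [if_pos hn]
    simp only [Bool.false_eq_true, false_iff]
    intro hcon
    omega
  · have hn2 : 2 ≤ n := by omega
    rw [if_neg hn, isprimeLoop_iff n 2 (by omega)]
    obtain ⟨m, rfl⟩ : ∃ m : ℕ, n = (m : Int) := ⟨n.toNat, by omega⟩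
    have hm : 2 ≤ m := by exact_mod_cast hn2
    simp only [Int.toNat_natCast]
    constructor
    · intro h
      refine ⟨hn2, ?_⟩
      by_contra hnp
      have hpd := Nat.minFac_dvd m
      have hpp := Nat.minFac_prime (show m ≠ 1 by omega)
      have hsq := Nat.minFac_sq_le_self (show 0 < m by omega) hnp
      refine h (m.minFac : Int) (by exact_mod_cast hpp.two_le) ?_ (by exact_mod_cast hpd)
      have : ((m.minFac * m.minFac : ℕ) : ℤ) ≤ ((m : ℕ) : ℤ) := by exact_mod_cast (by nlinarith [hsq] : m.minFac * m.minFac ≤ m)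
      push_cast at this
      linarith
    · rintro ⟨-, hp⟩ j h2j hjj hd
      lift j to ℕ using (by omega : (0:ℤ) ≤ j)
      have h2j' : 2 ≤ j := by exact_mod_cast h2j
      have hdk : j ∣ m := by exact_mod_cast hd
      rcases hp.eq_one_or_self_of_dvd j hdk with h | h
      · omega
      · subst h
        have h1 : (2 * j : ℕ) ≤ j * j := Nat.mul_le_mul_right j h2j'
        have h2 : ((j : ℤ)) * j ≤ (j : ℤ) := hjj
        have h3 : ((2 * j : ℕ) : ℤ) ≤ ((j * j : ℕ) : ℤ) := by exact_mod_cast h1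
        push_cast at h3
        linarith

lemma isPrimary_eq_isprime (z : Int) (hz : z ≠ 4) : isPrimary z = isprime z := by
  rw [Bool.eq_iff_iff, isPrimary_iff, isprime_iff]
  constructor
  · rintro ⟨h1, h2 | h2⟩
    · exact ⟨h1, h2⟩
    · exact absurd h2 hz
  · rintro ⟨h1, h2⟩
    exact ⟨h1, Or.inl h2⟩

lemma isPrimary_false_of_divisor (z d : Int) (hd : d ∣ z) (h1 : 2 ≤ d) (h2 : d < z) (h4 : z ≠ 4) :
    isPrimary z = false := by
  rw [← Bool.not_eq_true, isPrimary_iff]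
  rintro ⟨hz2, hp | hz4⟩
  · lift d to ℕ using (by omega : (0:ℤ) ≤ d) with k
    obtain ⟨m, rfl⟩ : ∃ m : ℕ, z = (m : Int) := ⟨z.toNat, by omega⟩
    have hkm : k ∣ m := by exact_mod_cast hd
    simp only [Int.toNat_natCast] at hp
    rcases hp.eq_one_or_self_of_dvd k hkm with h | h
    · omega
    · omega
  · exact h4 hz4

-- off the 5 (mod 6) grid the window always contains an evident composite, so A's condition is false
lemma condA_false (y : Int) (hy : 2 ≤ y) (hr : y % 6 ≠ 5) :
    (isPrimary y == true && isPrimary (y + 2) == true && isPrimary (y + 6) == true && isPrimary (y + 8) == true) = false := by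
  have h06 : y % 6 = 0 ∨ y % 6 = 1 ∨ y % 6 = 2 ∨ y % 6 = 3 ∨ y % 6 = 4 := by omega
  rcases h06 with h | h | h | h | h
  · have := isPrimary_false_of_divisor (y + 6) 2 (by omega) (by omega) (by omega) (by omega)
    simp [this]
  · have := isPrimary_false_of_divisor (y + 2) 3 (by omega) (by omega) (by omega) (by omega)
    simp [this]
  · have := isPrimary_false_of_divisor (y + 6) 2 (by omega) (by omega) (by omega) (by omega)
    simp [this]
  · have := isPrimary_false_of_divisor (y + 6) 3 (by omega) (by omega) (by omega) (by omega)
    simp [this]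
  · have := isPrimary_false_of_divisor (y + 6) 2 (by omega) (by omega) (by omega) (by omega)
    simp [this]

lemma loopA_acc : ∀ (n : Nat) (x y : Int), (x - y).toNat = n →
    ∀ T, quadLoopA x y T = T ++ quadLoopA x y [] := by
  intro n
  induction n using Nat.strong_induction_on with
  | _ n ih =>
    intro x y hn T
    conv_lhs => rw [quadLoopA.eq_def]
    conv_rhs => rw [quadLoopA.eq_def]
    by_cases h : y + 8 ≤ x
    · have hrec := ih ((x - (y + 1)).toNat) (by omega) x (y + 1) rfl
      rw [if_pos h, if_pos h,
        hrec (if isPrimary y == true && isPrimary (y + 2) == true && isPrimary (y + 6) == true && isPrimary (y + 8) == true then T ++ [[y, y + 2, y + 6, y + 8]] else T),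
        hrec (if isPrimary y == true && isPrimary (y + 2) == true && isPrimary (y + 6) == true && isPrimary (y + 8) == true then [] ++ [[y, y + 2, y + 6, y + 8]] else [])]
      split_ifs <;> simp
    · rw [if_neg h, if_neg h]
      simp

lemma loopB_acc : ∀ (n : Nat) (x y : Int), (x - y).toNat = n →
    ∀ T, quadLoopB x y T = T ++ quadLoopB x y [] := by
  intro n
  induction n using Nat.strong_induction_on with
  | _ n ih =>
    intro x y hn T
    conv_lhs => rw [quadLoopB.eq_def]
    conv_rhs => rw [quadLoopB.eq_def]
    by_cases h : y + 8 ≤ x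
    · have hrec := ih ((x - (y + 6)).toNat) (by omega) x (y + 6) rfl
      rw [if_pos h, if_pos h,
        hrec (if isprime y && isprime (y + 2) && isprime (y + 6) && isprime (y + 8) then T ++ [[y, y + 2, y + 6, y + 8]] else T),
        hrec (if isprime y && isprime (y + 2) && isprime (y + 6) && isprime (y + 8) then [] ++ [[y, y + 2, y + 6, y + 8]] else [])]
      split_ifs <;> simp
    · rw [if_neg h, if_neg h]
      simp

-- A's full scan from any y ≥ 2 equals B's scan from the next point of the 5 (mod 6) grid
lemma loop_main : ∀ (n : Nat) (x y : Int), (x - y).toNat = n → 2 ≤ y →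
    quadLoopA x y [] = quadLoopB x (y + (5 - y) % 6) [] := by
  intro n
  induction n using Nat.strong_induction_on with
  | _ n ih =>
    intro x y hn hy
    have hg0 : 0 ≤ (5 - y) % 6 := Int.emod_nonneg _ (by norm_num)
    have hg5 : (5 - y) % 6 < 6 := Int.emod_lt_of_pos _ (by norm_num)
    by_cases h : y + 8 ≤ x
    · by_cases h5 : y % 6 = 5
      · have hgy : (5 - y) % 6 = 0 := by omega
        rw [hgy, add_zero, quadLoopA, if_pos h, quadLoopB, if_pos h]
        rw [loopA_acc ((x - (y + 1)).toNat) x (y + 1) rfl,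
            loopB_acc ((x - (y + 6)).toNat) x (y + 6) rfl]
        have e0 : isPrimary y = isprime y := isPrimary_eq_isprime _ (by omega)
        have e2 : isPrimary (y + 2) = isprime (y + 2) := isPrimary_eq_isprime _ (by omega)
        have e6 : isPrimary (y + 6) = isprime (y + 6) := isPrimary_eq_isprime _ (by omega)
        have e8 : isPrimary (y + 8) = isprime (y + 8) := isPrimary_eq_isprime _ (by omega)
        have ihA := ih ((x - (y + 1)).toNat) (by omega) x (y + 1) rfl (by omega)
        have hg1 : (5 - (y + 1)) % 6 = 5 := by omega
        rw [hg1, show y + 1 + 5 = y + 6 by ring] at ihA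
        rw [ihA, e0, e2, e6, e8]
        simp
      · have hA := condA_false y hy h5
        rw [quadLoopA, if_pos h, hA]
        simp only [Bool.false_eq_true, if_false]
        have ihA := ih ((x - (y + 1)).toNat) (by omega) x (y + 1) rfl (by omega)
        rw [ihA]
        congr 1
        omega
    · rw [quadLoopA, if_neg h, quadLoopB, if_neg (by omega)]

-- ===== VERDICT (by name: the statement is the Claim_ definition above) =====
theorem quadruplet_spec : Claim_equal_quadruplet := by
  intro x _
  unfold Spec_quadruplet quadruplet quadruplet_alt
  have h := loop_main (x - 2).toNat x 2 rfl (by omega)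
  norm_num at h
  exact h
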